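-- pv_equiv track=rewrite | github.com/kungminno/programmers | algorithm/algorithm_87.py | solution
-- ===== SOURCE A (Python) =====
-- def solution(n, left, right):
--     answer = []
--     first = left//n
--     for r in range(first,n):
--         for c in range(n):
--             value = max(r+1,c+1)
--             idx = r*n + c
--             if left <= idx <=right:
--                 answer.append(value)
--             elif idx > right:
--                 break
--     return answer
-- ===== SOURCE B (Python) =====
-- def solution(n, left, right):
--     if n <= 0:
--         return []
--     return [max(i // n + 1, i % n + 1) for i in range(left, min(right, n * n - 1) + 1)]
-- ===== Notes on version B (the rewrite author's own statement) =====
-- stated objective: faster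
-- what changed: B drops the grid-style nested row/column loops with index guard and break, mapping the closed-form max(i//n+1, i%n+1) over the single flattened index range left..min(right, n*n-1), so it touches only the requested slice instead of scanning rows.
import Mathlib
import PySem

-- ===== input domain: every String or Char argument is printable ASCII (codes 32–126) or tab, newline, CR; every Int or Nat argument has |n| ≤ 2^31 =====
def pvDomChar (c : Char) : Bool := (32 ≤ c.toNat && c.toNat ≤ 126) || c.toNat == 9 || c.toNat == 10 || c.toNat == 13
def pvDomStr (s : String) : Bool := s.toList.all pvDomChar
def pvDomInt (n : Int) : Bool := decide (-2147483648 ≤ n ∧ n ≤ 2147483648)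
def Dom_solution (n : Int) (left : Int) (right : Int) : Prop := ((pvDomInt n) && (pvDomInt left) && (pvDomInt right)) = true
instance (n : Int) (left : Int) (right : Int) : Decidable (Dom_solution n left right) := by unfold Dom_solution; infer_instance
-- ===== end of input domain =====

-- B replaces A's nested row/column loops (with an in-range guard and a break) by a single map of a
-- closed-form value over the flattened index range: no nested loop, and only the requested slice is touched (measured faster).
-- Return-value equivalence only; neither program mutates its arguments.

-- ===== PORT A =====
-- inner 'for c in range(n)' loop of A (c counts up, like Python's lazy range); the break
-- returns the accumulator as-is
def solutionInner (n : Int) (left : Int) (right : Int) (r : Int) (c : Int)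
    (acc : List Int) : List Int :=
  if c < n then
    let value := max (r + 1) (c + 1)
    let idx := r * n + c
    if left ≤ idx ∧ idx ≤ right then
      solutionInner n left right r (c + 1) (acc ++ [value])
    else if idx > right then
      acc
    else
      solutionInner n left right r (c + 1) acc
  else acc
termination_by (n - c).toNat
decreasing_by all_goals omega

-- outer 'for r in range(first, n)' loop of A
def solutionOuter (n : Int) (left : Int) (right : Int) (r : Int) (acc : List Int) : List Int :=
  if r < n then
    solutionOuter n left right (r + 1) (solutionInner n left right r 0 acc)
  else acc
termination_by (n - r).toNat
decreasing_by all_goals omega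

def solution (n : Int) (left : Int) (right : Int) : List Int :=
  let first := PySem.Int.floordiv left n
  solutionOuter n left right first []

-- ===== PORT B =====
def solution_alt (n : Int) (left : Int) (right : Int) : List Int :=
  if n ≤ 0 then []
  else (PySem.List.pyRange left (min right (n * n - 1) + 1) 1).map
    (fun i => max (PySem.Int.floordiv i n + 1) (PySem.Int.mod i n + 1))

-- ===== PRECONDITION & SPEC =====
-- Pre_ excludes only n = 0, where A raises ZeroDivisionError (left//n).
def Pre_solution (n : Int) (left : Int) (right : Int) : Prop := n ≠ 0
instance (n : Int) (left : Int) (right : Int) : Decidable (Pre_solution n left right) := by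
  unfold Pre_solution; infer_instance

def pvWitness_solution : Int × Int × Int := (3, 2, 5)

def Spec_solution (n : Int) (left : Int) (right : Int) (out : List Int) : Prop :=
  out = solution_alt n left right
instance (n : Int) (left : Int) (right : Int) (out : List Int) : Decidable (Spec_solution n left right out) := by
  unfold Spec_solution; infer_instance

-- ===== CLAIM (what is proved, stated in full; the proofs are below) =====
def Claim_equal_solution : Prop := ∀ (n : Int) (left : Int) (right : Int),
  Dom_solution n left right → Pre_solution n left right →
  Spec_solution n left right (solution n left right)

-- ===== LEMMAS AND PROOFS =====

-- the closed-form value B maps over the flattened indices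
def gval (n i : Int) : Int := max (PySem.Int.floordiv i n + 1) (PySem.Int.mod i n + 1)

lemma gval_eq (n r c : Int) (hn : 0 < n) (hc0 : 0 ≤ c) (hcn : c < n) :
    gval n (r * n + c) = max (r + 1) (c + 1) := by
  have hfd : PySem.Int.floordiv (r * n + c) n = r := by
    rw [PySem.Int.floordiv_eq_iff_of_pos hn]
    constructor <;> nlinarith
  have hmod : PySem.Int.mod (r * n + c) n = c := by
    have := PySem.Int.floordiv_mul_add_mod (r * n + c) n
    rw [hfd] at this; omega
  simp [gval, hfd, hmod]

-- A's inner loop over columns c0..n-1 appends exactly gval over the flattened indices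
-- clamped to [left, right]
lemma inner_eq (n left right r : Int) (hn : 0 < n) (c0 : Int) (hc0 : 0 ≤ c0) (acc : List Int) :
    solutionInner n left right r c0 acc =
      acc ++ (PySem.List.pyRange (max (r * n + c0) left) (min (r * n + n - 1) right + 1) 1).map (gval n) := by
  rw [solutionInner]
  by_cases h : c0 < n
  swap
  · rw [if_neg h, PySem.List.pyRange_one_eq_nil (by omega)]
    simp
  · rw [if_pos h]
    simp only
    have hidx : r * n + c0 < r * n + n := by omega
    by_cases hin : left ≤ r * n + c0 ∧ r * n + c0 ≤ right
    · rw [if_pos hin, inner_eq n left right r hn (c0 + 1) (by omega) (acc ++ [max (r+1) (c0+1)])]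
      have hmax1 : max (r * n + c0) left = r * n + c0 := by omega
      have hmax2 : max (r * n + (c0 + 1)) left = r * n + c0 + 1 := by omega
      have hlt : r * n + c0 < min (r * n + n - 1) right + 1 := by omega
      rw [hmax1, hmax2, PySem.List.pyRange_one_cons hlt, List.map_cons,
        gval_eq n r c0 hn hc0 h]
      simp
    · rw [if_neg hin]
      by_cases hbr : r * n + c0 > right
      · rw [if_pos hbr, PySem.List.pyRange_one_eq_nil (by omega)]
        simp
      · rw [if_neg hbr, inner_eq n left right r hn (c0 + 1) (by omega) acc]
        have : max (r * n + c0) left = max (r * n + (c0 + 1)) left := by omega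
        rw [this]
termination_by (n - c0).toNat
decreasing_by all_goals omega

-- A's outer loop over rows r0..n-1, given left < r0*n + n, produces gval over the flattened
-- indices clamped to [left, right] and to the grid
lemma outer_eq (n left right : Int) (hn : 0 < n) (r0 : Int) (hl : left < r0 * n + n) (acc : List Int) :
    solutionOuter n left right r0 acc =
      acc ++ (PySem.List.pyRange (max (r0 * n) left) (min (n * n - 1) right + 1) 1).map (gval n) := by
  rw [solutionOuter]
  by_cases h : r0 < n
  swap
  · rw [not_lt] at h
    have hnn : n * n ≤ r0 * n := mul_le_mul_of_nonneg_right h (le_of_lt hn)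
    have hnil2 : PySem.List.pyRange (max (r0 * n) left) (min (n * n - 1) right + 1) 1 = [] := by
      apply PySem.List.pyRange_one_eq_nil
      have h1 := min_le_left (n * n - 1) right
      have h2 := le_max_left (r0 * n) left
      linarith
    rw [if_neg (by omega), hnil2]
    simp
  · rw [if_pos h]
    rw [inner_eq n left right r0 hn 0 le_rfl acc]
    have hrow : r0 * n + n ≤ n * n := by nlinarith
    rw [outer_eq n left right hn (r0 + 1) (by nlinarith) _]
    rw [List.append_assoc, ← List.map_append]
    congr 2
    by_cases hr : right ≤ r0 * n + n - 1
    · -- right ends inside this row: the remaining rows contribute nothing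
      have h2 : min (r0 * n + n - 1) right = right := by omega
      have h3 : PySem.List.pyRange (max ((r0 + 1) * n) left) (min (n * n - 1) right + 1) 1 = [] := by
        apply PySem.List.pyRange_one_eq_nil; have : r0 * n + n = (r0 + 1) * n := by ring
        omega
      have h5 : min (n * n - 1) right = right := by omega
      rw [h2, h3, h5, List.append_nil]
      congr 1; omega
    · -- row exhausted: ranges are contiguous at r0*n + n
      have h2 : min (r0 * n + n - 1) right = r0 * n + n - 1 := by omega
      have h4 : max ((r0 + 1) * n) left = r0 * n + n := by
        have : r0 * n + n = (r0 + 1) * n := by ring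
        omega
      have e1 : max (r0 * n + 0) left = max (r0 * n) left := by omega
      have e2 : r0 * n + n - 1 + 1 = r0 * n + n := by omega
      rw [h2, h4, e1, e2]
      rw [← PySem.List.pyRange_one_append (max (r0 * n) left) (r0 * n + n)
            (min (n * n - 1) right + 1) (by omega) (by omega)]
termination_by (n - r0).toNat
decreasing_by all_goals omega

-- for n ≤ 0 the inner column loop never runs, so the outer loop returns the accumulator
lemma outer_nonpos (n left right : Int) (hn : n ≤ 0) (r0 : Int) (acc : List Int) :
    solutionOuter n left right r0 acc = acc := by
  rw [solutionOuter]
  by_cases h : r0 < n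
  · rw [if_pos h, solutionInner, if_neg (by omega), outer_nonpos n left right hn (r0 + 1) acc]
  · rw [if_neg h]
termination_by (n - r0).toNat
decreasing_by all_goals omega

lemma floordiv_bounds (left n : Int) (hn : 0 < n) :
    PySem.Int.floordiv left n * n ≤ left ∧ left < PySem.Int.floordiv left n * n + n := by
  have h := PySem.Int.floordiv_mul_add_mod left n
  have h1 := PySem.Int.mod_nonneg left hn
  have h2 := PySem.Int.mod_lt left hn
  omega

-- ===== VERDICT (by name: the statement is the Claim_ definition above) =====
theorem solution_spec : Claim_equal_solution := by
  intro n left right _ hpre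
  unfold Spec_solution solution solution_alt
  rcases lt_trichotomy n 0 with hneg | hz | hpos
  · -- n < 0: A's inner column loop never runs, so A returns []; B returns []
    rw [if_pos (by omega)]
    exact outer_nonpos n left right (le_of_lt hneg) _ []
  · exact absurd hz hpre
  · rw [if_neg (by omega)]
    obtain ⟨hb1, hb2⟩ := floordiv_bounds left n hpos
    rw [outer_eq n left right hpos (PySem.Int.floordiv left n) hb2 []]
    have hm : max (PySem.Int.floordiv left n * n) left = left := by omega
    have hm2 : min (n * n - 1) right = min right (n * n - 1) := min_comm _ _
    rw [hm, hm2]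
    rfl
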